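-- pv_equiv track=rewrite | github.com/2760914216/PB_Teddy | src/task2/sql_guardrails.py | _split_select_columns
-- ===== SOURCE A (Python) =====
-- def _split_select_columns(raw_columns: str) -> list[str]:
--     columns: list[str] = []
--     current: list[str] = []
--     depth = 0
--     for char in raw_columns:
--         if char == "(":
--             depth += 1
--         elif char == ")":
--             depth = max(0, depth - 1)
--         if char == "," and depth == 0:
--             column = "".join(current).strip()
--             if column:
--                 columns.append(column)
--             current = []
--             continue
--         current.append(char)
--     final_column = "".join(current).strip()
--     if final_column:
--         columns.append(final_column)
--     return columns
-- ===== SOURCE B (Python) =====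
-- def _split_select_columns(raw_columns: str) -> list[str]:
--     columns: list[str] = []
--     buf: list[str] = []
--     depth = 0
--     for frag in raw_columns.split(','):
--         buf.append(frag)
--         for ch in frag:
--             if ch == '(':
--                 depth += 1
--             elif ch == ')':
--                 depth = max(0, depth - 1)
--         if depth == 0:
--             segment = ','.join(buf).strip()
--             if segment:
--                 columns.append(segment)
--             buf = []
--     if buf:
--         segment = ','.join(buf).strip()
--         if segment:
--             columns.append(segment)
--     return columns
-- ===== Notes on version B (the rewrite author's own statement) =====
-- stated objective: alternative
-- what changed: A streams character by character into one accumulator, deciding at each comma; B splits the whole string on every comma up front and then re-merges consecutive fragments with a comma while a running clamped parenthesis depth is positive, flushing a stripped segment whenever depth returns to zero. (constant-factor speedup measured: the bulk character copying moves from a per-character Python loop into C-level str.split/str.join).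
import Mathlib
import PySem

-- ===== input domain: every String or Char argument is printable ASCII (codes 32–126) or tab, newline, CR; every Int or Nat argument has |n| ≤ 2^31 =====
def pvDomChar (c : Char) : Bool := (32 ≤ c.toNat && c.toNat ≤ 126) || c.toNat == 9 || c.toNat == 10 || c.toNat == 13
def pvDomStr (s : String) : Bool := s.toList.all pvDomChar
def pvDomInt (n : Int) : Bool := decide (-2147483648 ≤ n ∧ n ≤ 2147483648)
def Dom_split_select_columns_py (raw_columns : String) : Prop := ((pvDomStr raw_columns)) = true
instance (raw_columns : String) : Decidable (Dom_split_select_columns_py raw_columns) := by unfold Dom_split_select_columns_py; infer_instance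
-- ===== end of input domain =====

-- B replaces A's single streaming character accumulator by "split on every comma, then
-- re-merge fragments while the running parenthesis depth is positive" (alternative decomposition).

-- ===== PORT A =====
-- shared by both ports: the depth update both Pythons perform per character
def pvDepth (d : Int) (c : Char) : Int :=
  if c = '(' then d + 1 else if c = ')' then max 0 (d - 1) else d

-- shared: "strip, and append only if non-empty" (identical lines in both Pythons)
def pvAppend (cols : List String) (cur : List Char) : List String :=
  let column := PySem.Chars.strip cur
  if column ≠ [] then cols ++ [String.ofList column] else cols

def pvStepA (st : List String × List Char × Int) (c : Char) :
    List String × List Char × Int :=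
  let d := pvDepth st.2.2 c
  if c = ',' ∧ d = 0 then (pvAppend st.1 st.2.1, [], d)
  else (st.1, st.2.1 ++ [c], d)

def split_select_columns_py (raw_columns : String) : List String :=
  let st := raw_columns.toList.foldl pvStepA ([], [], 0)
  pvAppend st.1 st.2.1

-- ===== PORT B =====
def pvStepB (st : List String × List (List Char) × Int) (frag : List Char) :
    List String × List (List Char) × Int :=
  let buf := st.2.1 ++ [frag]
  let d := frag.foldl pvDepth st.2.2
  if d = 0 then (pvAppend st.1 (PySem.Chars.join [','] buf), [], d)
  else (st.1, buf, d)

def split_select_columns_py_alt (raw_columns : String) : List String :=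
  -- raw_columns.split(',') : single-character separator split = List.splitOn (exact)
  let st := (List.splitOn ',' raw_columns.toList).foldl pvStepB ([], [], 0)
  if st.2.1 ≠ [] then pvAppend st.1 (PySem.Chars.join [','] st.2.1) else st.1

-- ===== PRECONDITION & SPEC =====
def Spec_split_select_columns_py (raw_columns : String) (out : List String) : Prop := out = split_select_columns_py_alt raw_columns
instance (raw_columns : String) (out : List String) : Decidable (Spec_split_select_columns_py raw_columns out) := by unfold Spec_split_select_columns_py; infer_instance

-- ===== CLAIM (what is proved, stated in full; the proofs are below) =====
def Claim_equal_split_select_columns_py : Prop := ∀ (raw_columns : String), Dom_split_select_columns_py raw_columns → Spec_split_select_columns_py raw_columns (split_select_columns_py raw_columns)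

-- ===== LEMMAS AND PROOFS =====

-- every piece of a single-element splitOn is free of the separator
lemma pv_splitOnP_not_mem (p : Char → Bool) :
    ∀ (xs : List Char), ∀ l ∈ List.splitOnP p xs, ∀ a ∈ l, ¬ p a := by
  intro xs
  induction xs with
  | nil => intro l hl a ha; simp [List.splitOnP_nil] at hl; subst hl; simp at ha
  | cons x xs ih =>
    intro l hl a ha
    rw [List.splitOnP_cons] at hl
    by_cases hp : p x
    · simp [hp] at hl
      rcases hl with h | h
      · subst h; simp at ha
      · exact ih l h a ha
    · simp [hp] at hl
      rcases hh : List.splitOnP p xs with _ | ⟨h0, t⟩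
      · exact absurd hh (List.splitOnP_ne_nil p xs)
      · rw [hh] at hl
        simp only [List.modifyHead, List.mem_cons] at hl
        rcases hl with h | h
        · subst h
          rcases List.mem_cons.mp ha with rfl | ha2
          · simpa using hp
          · exact ih h0 (by rw [hh]; exact List.mem_cons_self) a ha2
        · exact ih l (by rw [hh]; exact List.mem_cons_of_mem _ h) a ha

lemma pv_splitOn_ne_nil (xs : List Char) : List.splitOn ',' xs ≠ [] := by
  simpa [List.splitOn] using List.splitOnP_ne_nil (fun c => c == ',') xs

-- intercalate over a cons with nonempty tail
lemma pv_intercalate_cons (f g : List Char) (t : List (List Char)) :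
    [','].intercalate (f :: g :: t) = f ++ [','] ++ [','].intercalate (g :: t) := by
  simp [List.intercalate]

lemma pv_join_append (buf : List (List Char)) (f : List Char) (h : buf ≠ []) :
    [','].intercalate (buf ++ [f]) = [','].intercalate buf ++ [','] ++ f := by
  induction buf with
  | nil => exact absurd rfl h
  | cons b bs ih =>
    rcases bs with _ | ⟨b2, t⟩
    · simp [List.intercalate]
    · simp only [List.cons_append]
      rw [pv_intercalate_cons b b2 (t ++ [f]), pv_intercalate_cons b b2 t]
      have hih := ih (by simp)
      simp only [List.cons_append] at hih
      rw [hih]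
      simp

-- A's loop over a comma-free fragment only accumulates characters and updates the depth
lemma pv_foldA_fragment :
    ∀ (f : List Char), (∀ a ∈ f, ¬ a = ',') → ∀ (cols : List String) (cur : List Char) (d : Int),
      f.foldl pvStepA (cols, cur, d) = (cols, cur ++ f, f.foldl pvDepth d) := by
  intro f
  induction f with
  | nil => intro _ cols cur d; simp
  | cons c f ih =>
    intro hcf cols cur d
    have hc : ¬ c = ',' := hcf c (List.mem_cons_self)
    have : pvStepA (cols, cur, d) c = (cols, cur ++ [c], pvDepth d c) := by
      simp [pvStepA, hc]
    rw [List.foldl_cons, this, ih (fun a ha => hcf a (List.mem_cons_of_mem _ ha))]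
    simp

-- the fragment-merging loop of B computes what A's character loop computes
lemma pv_main :
    ∀ (frags : List (List Char)), frags ≠ [] → (∀ f ∈ frags, ∀ a ∈ f, ¬ a = ',') →
    ∀ (cols : List String) (buf : List (List Char)) (cur : List Char) (d : Int),
      ((buf = [] ∧ cur = []) ∨ (buf ≠ [] ∧ cur = [','].intercalate buf ++ [','])) →
      (let st := ([','].intercalate frags).foldl pvStepA (cols, cur, d)
       pvAppend st.1 st.2.1) =
      (let st := frags.foldl pvStepB (cols, buf, d)
       if st.2.1 ≠ [] then pvAppend st.1 (PySem.Chars.join [','] st.2.1) else st.1) := by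
  intro frags
  induction frags with
  | nil => intro h; exact absurd rfl h
  | cons f rest ih =>
    intro _ hcf cols buf cur d hinv
    have hf : ∀ a ∈ f, ¬ a = ',' := hcf f (List.mem_cons_self)
    have hrest : ∀ g ∈ rest, ∀ a ∈ g, ¬ a = ',' :=
      fun g hg => hcf g (List.mem_cons_of_mem _ hg)
    have hcur : cur ++ f = [','].intercalate (buf ++ [f]) := by
      rcases hinv with ⟨hb, hc⟩ | ⟨hb, hc⟩
      · subst hb; subst hc; simp [List.intercalate]
      · subst hc
        rw [pv_join_append buf f hb]
    rcases rest with _ | ⟨g, t⟩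
    · -- last fragment: both sides finish with pvAppend on the same characters
      have hone : [','].intercalate [f] = f := by simp [List.intercalate]
      simp only [hone, List.foldl_cons, List.foldl_nil]
      rw [pv_foldA_fragment f hf cols cur d]
      simp only [pvStepB]
      by_cases hd : f.foldl pvDepth d = 0
      · simp [hd, PySem.Chars.join, hcur]
      · simp [hd, PySem.Chars.join, hcur]
    · -- a comma follows: A flushes or keeps the comma; B flushes or grows the buffer
      rw [pv_intercalate_cons f g t]
      rw [List.foldl_append, List.foldl_append]
      rw [pv_foldA_fragment f hf cols cur d]
      simp only [List.foldl_cons, List.foldl_nil]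
      set d' := f.foldl pvDepth d with hd'
      have hdepthcomma : pvDepth d' ',' = d' := by simp [pvDepth]
      by_cases hd0 : d' = 0
      · have hA : pvStepA (cols, cur ++ f, d') ',' = (pvAppend cols (cur ++ f), [], d') := by
          simp [pvStepA, pvDepth, hd0]
        have hB : pvStepB (cols, buf, d) f
            = (pvAppend cols (PySem.Chars.join [','] (buf ++ [f])), [], d') := by
          simp [pvStepB, ← hd', hd0]
        rw [hA, hB, hcur]
        exact ih (by simp) hrest _ [] [] d' (Or.inl ⟨rfl, rfl⟩)
      · have hA : pvStepA (cols, cur ++ f, d') ',' = (cols, cur ++ f ++ [','], d') := by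
          simp [pvStepA, pvDepth, hd0]
        have hB : pvStepB (cols, buf, d) f = (cols, buf ++ [f], d') := by
          simp [pvStepB, ← hd', hd0]
        rw [hA, hB]
        exact ih (by simp) hrest _ (buf ++ [f]) _ d'
          (Or.inr ⟨by simp, by rw [hcur]⟩)

-- ===== VERDICT (by name: the statement is the Claim_ definition above) =====
theorem split_select_columns_py_spec : Claim_equal_split_select_columns_py := by
  intro raw _
  unfold Spec_split_select_columns_py split_select_columns_py split_select_columns_py_alt
  have hfree : ∀ f ∈ List.splitOn ',' raw.toList, ∀ a ∈ f, ¬ a = ',' := by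
    intro f hf a ha
    have := pv_splitOnP_not_mem (fun c => c == ',') raw.toList f
      (by simpa [List.splitOn] using hf) a ha
    simpa using this
  have h := pv_main (List.splitOn ',' raw.toList) (pv_splitOn_ne_nil raw.toList) hfree
    [] [] [] 0 (Or.inl ⟨rfl, rfl⟩)
  rw [List.intercalate_splitOn raw.toList ','] at h
  exact h
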